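-- pv_equiv track=rewrite | github.com/Owlbuklya/Course-Python | m3/m3_p3_l2.py | textor
-- ===== SOURCE A (Python) =====
-- def textor(string_in, len_word):
-- 	string_without_punc_sym = ''
-- 	for symbol in string_in:
-- 		if symbol.isalnum() or symbol == ' ' or symbol == '\n':
-- 			string_without_punc_sym += symbol
-- 	str_list = string_without_punc_sym.split()
-- 	list_out = []
-- 	for word in str_list:
-- 		if len(word) < len_word:
-- 			list_out.append(word)
-- 	return list_out
-- ===== SOURCE B (Python) =====
-- def textor(string_in, len_word):
--     list_out = []
--     buf = []
--     for ch in string_in: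
--         if ch.isalnum():
--             buf.append(ch)
--         elif ch == ' ' or ch == '\n':
--             if buf and len(buf) < len_word:
--                 list_out.append(''.join(buf))
--             buf = []
--         # any other char (tab, punctuation) is dropped without flushing
--     if buf and len(buf) < len_word:
--         list_out.append(''.join(buf))
--     return list_out
-- ===== Notes on version B (the rewrite author's own statement) =====
-- stated objective: simpler
-- what changed: Replaced A's three phases (build a filtered copy of the string, split it, filter the words by length) with a single pass over the characters maintaining a current-word buffer that is flushed on space/newline and at the end.
import Mathlib
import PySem

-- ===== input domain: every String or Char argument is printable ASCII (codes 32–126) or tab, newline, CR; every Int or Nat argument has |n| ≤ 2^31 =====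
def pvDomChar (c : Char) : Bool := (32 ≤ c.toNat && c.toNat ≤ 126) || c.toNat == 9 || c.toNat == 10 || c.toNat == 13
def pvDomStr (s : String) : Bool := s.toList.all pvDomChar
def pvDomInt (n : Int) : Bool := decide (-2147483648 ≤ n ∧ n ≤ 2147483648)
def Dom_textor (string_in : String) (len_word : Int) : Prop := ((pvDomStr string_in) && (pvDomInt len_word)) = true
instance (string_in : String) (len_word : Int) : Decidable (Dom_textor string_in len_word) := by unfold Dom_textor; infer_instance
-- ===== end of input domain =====

-- B replaces A's three phases (filter chars into a new string, split it, filter words by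
-- length) with a single pass over the characters keeping a current-word buffer (objective:
-- simpler one-pass decomposition; same asymptotic cost).

-- ===== PORT A =====
-- A: build the filtered string, split on whitespace, keep the short words.
def textor (string_in : String) (len_word : Int) : List String :=
  let string_without_punc_sym : List Char :=
    string_in.toList.foldl
      (fun acc symbol =>
        if PySem.Chars.isalnum symbol || symbol == ' ' || symbol == '\n' then acc ++ [symbol]
        else acc) []
  let str_list := PySem.Chars.split₀ string_without_punc_sym
  str_list.foldl
    (fun list_out word =>
      if (word.length : Int) < len_word then list_out ++ [String.ofList word] else list_out) []

-- ===== PORT B =====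
-- B: one pass; flush the buffer on ' '/'\n' and at the end, drop other non-alnum chars.
def textorFlush (len_word : Int) (out : List String) (buf : List Char) : List String :=
  if buf ≠ [] ∧ (buf.length : Int) < len_word then out ++ [String.ofList buf] else out

def textorStep (len_word : Int) (st : List String × List Char) (ch : Char) : List String × List Char :=
  if PySem.Chars.isalnum ch then (st.1, st.2 ++ [ch])
  else if ch == ' ' || ch == '\n' then (textorFlush len_word st.1 st.2, [])
  else st

def textor_alt (string_in : String) (len_word : Int) : List String :=
  let st := string_in.toList.foldl (textorStep len_word) ([], [])
  textorFlush len_word st.1 st.2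

-- ===== PRECONDITION & SPEC =====
def Spec_textor (string_in : String) (len_word : Int) (out : List String) : Prop := out = textor_alt string_in len_word
instance (string_in : String) (len_word : Int) (out : List String) : Decidable (Spec_textor string_in len_word out) := by unfold Spec_textor; infer_instance

-- ===== CLAIM (what is proved, stated in full; the proofs are below) =====
def Claim_equal_textor : Prop := ∀ (string_in : String) (len_word : Int), Dom_textor string_in len_word → Spec_textor string_in len_word (textor string_in len_word)

-- ===== LEMMAS AND PROOFS =====

-- a structural reformulation of PySem.Chars.split₀ (accumulator-free)
def mySplit : List Char → List Char → List (List Char)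
  | [], buf => if buf = [] then [] else [buf]
  | c :: rest, buf =>
      if PySem.Chars.isspace c then
        (if buf = [] then mySplit rest [] else buf :: mySplit rest [])
      else mySplit rest (buf ++ [c])

theorem split_go_eq (s : List Char) : ∀ (cur : List Char) (acc : List (List Char)),
    PySem.Chars.split₀.go s cur acc = acc.reverse ++ mySplit s cur.reverse := by
  induction s with
  | nil =>
    intro cur acc
    simp [PySem.Chars.split₀.go, mySplit, List.isEmpty_iff]
    by_cases h : cur = [] <;> simp [h]
  | cons c rest ih =>
    intro cur acc
    simp only [PySem.Chars.split₀.go, mySplit]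
    by_cases hs : PySem.Chars.isspace c
    · by_cases hc : cur = [] <;>
        simp [hs, hc, List.isEmpty_iff, ih]
    · simp [hs, ih (c :: cur) acc]

theorem split₀_eq (s : List Char) : PySem.Chars.split₀ s = mySplit s [] := by
  simpa using split_go_eq s [] []

theorem alnum_not_space (c : Char) (h : PySem.Chars.isalnum c = true) :
    PySem.Chars.isspace c = false := by
  simp [PySem.Chars.isalnum, PySem.Chars.isalpha, PySem.Chars.isdigit,
    PySem.Chars.isupper, PySem.Chars.islower, Char.le_def, UInt32.le_iff_toNat_le,
    Char.toNat_val] at h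
  simp [PySem.Chars.isspace]
  omega

-- the select phase of A over mySplit words, as foldl = filter+map
theorem sel_foldl (len_word : Int) (ws : List (List Char)) (o : List String) :
    ws.foldl (fun list_out word =>
      if (word.length : Int) < len_word then list_out ++ [String.ofList word] else list_out) o
      = o ++ (ws.filter (fun w => decide ((w.length : Int) < len_word))).map String.ofList := by
  induction ws generalizing o with
  | nil => simp
  | cons w ws ih =>
    by_cases h : (w.length : Int) < len_word <;> simp [h, ih]

def selWords (len_word : Int) (ws : List (List Char)) : List String :=
  (ws.filter (fun w => decide ((w.length : Int) < len_word))).map String.ofList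

-- main invariant: B's one-pass loop from state (out, buf) computes out ++ the
-- selected words of mySplit applied to the filtered remainder with pending buffer buf
theorem main_inv (len_word : Int) (cs : List Char) :
    ∀ (out : List String) (buf : List Char),
    textorFlush len_word (cs.foldl (textorStep len_word) (out, buf)).1
        (cs.foldl (textorStep len_word) (out, buf)).2
      = out ++ selWords len_word (mySplit (cs.filter
          (fun c => PySem.Chars.isalnum c || c == ' ' || c == '\n')) buf) := by
  induction cs with
  | nil =>
    intro out buf
    by_cases h : buf = []
    · simp [h, mySplit, textorFlush, selWords]
    · by_cases hl : (buf.length : Int) < len_word <;>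
        simp [h, hl, mySplit, textorFlush, selWords]
  | cons c rest ih =>
    intro out buf
    by_cases ha : PySem.Chars.isalnum c
    · rw [List.foldl_cons, List.filter_cons]
      simp only [textorStep, ha, Bool.true_or, if_true]
      rw [ih out (buf ++ [c])]
      simp [mySplit, alnum_not_space c ha]
    · by_cases hsp : (c == ' ' || c == '\n') = true
      · have hspace : PySem.Chars.isspace c = true := by
          rcases Bool.or_eq_true_iff.mp hsp with h | h <;>
            · rw [beq_iff_eq] at h; subst h; decide
        rw [List.foldl_cons, List.filter_cons]
        simp only [textorStep, ha, hsp, Bool.false_or, if_true, Bool.false_eq_true, if_false]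
        rw [ih (textorFlush len_word out buf) []]
        by_cases hb : buf = []
        · simp [hb, mySplit, hspace, textorFlush]
        · by_cases hl : (buf.length : Int) < len_word <;>
            simp [hb, hl, mySplit, hspace, textorFlush, selWords]
      · rw [List.foldl_cons, List.filter_cons]
        simp only [textorStep, ha, hsp, Bool.false_or, Bool.false_eq_true, if_false]
        exact ih out buf

-- ===== VERDICT (by name: the statement is the Claim_ definition above) =====
theorem textor_spec : Claim_equal_textor := by
  intro string_in len_word _
  unfold Spec_textor textor textor_alt
  have hfilt := PySem.List.foldl_append_if
    (fun c => PySem.Chars.isalnum c || c == ' ' || c == '\n') id string_in.toList []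
  simp only [id_eq, List.map_id, List.nil_append] at hfilt
  simp only [hfilt, split₀_eq]
  rw [sel_foldl, main_inv len_word string_in.toList [] []]
  simp [selWords]
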